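-- pv_equiv track=rewrite | github.com/Harshkaushik04/CodeforcesContests | extras/newq2.py | alice_score
-- ===== SOURCE A (Python) =====
-- def alice_score(n, colors):
--     # Dictionary to store frequency of each color
--     color_counts = {}
--
--     # Count the frequency of each color
--     for color in colors:
--         if color in color_counts:
--             color_counts[color] += 1
--         else:
--             color_counts[color] = 1
--
--     # Alice's score
--     alice_score = 0
--     alice_taken = {color: 0 for color in color_counts}  # Track how many marbles Alice has taken from each color
--     total_marbles = len(colors)
--
--     # Sort colors by frequency (ascending order of frequency)
--     sorted_colors = sorted(color_counts.items(), key=lambda x: x[1])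
--
--     # Turn simulation: 0 for Alice, 1 for Bob
--     turn = 0
--     remaining_counts = dict(color_counts)  # Copy of the color_counts dictionary
--
--     while sum(remaining_counts.values()) > 0:
--         # Find the color with the smallest remaining marbles
--         remaining_colors = [color for color, count in remaining_counts.items() if count > 0]
--         remaining_colors.sort(key=lambda x: remaining_counts[x])  # Sort colors by remaining count
--
--         if not remaining_colors:
--             break
--
--         # Select the color with the least remaining marbles
--         selected_color = remaining_colors[0]
--
--         if turn == 0:  # Alice's turn
--             alice_taken[selected_color] += 1
--             remaining_counts[selected_color] -= 1
--
--             # If Alice has taken all marbles of a color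
--             if remaining_counts[selected_color] == 0 and alice_taken[selected_color]==color_counts[selected_color]:
--                 alice_score += 1  # Alice gets an extra point for completing this color
--             alice_score += 1  # Alice gets 1 point for taking at least one marble from this color
--
--         else:  # Bob's turn
--             remaining_counts[selected_color] -= 1
--
--         # Alternate turns
--         turn = 1 - turn
--
--     return alice_score
-- ===== SOURCE B (Python) =====
-- def alice_score(n, colors):
--     counts = {}
--     for c in colors:
--         counts[c] = counts.get(c, 0) + 1
--     score = 0
--     parity = 0
--     for cnt in sorted(counts.values()):
--         if parity % 2 == 0:
--             score += (cnt + 1) // 2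
--             if cnt == 1:
--                 score += 1
--         else:
--             score += cnt // 2
--         parity += cnt
--     return score
-- ===== Notes on version B (the rewrite author's own statement) =====
-- stated objective: faster
-- what changed: A re-simulates the game marble by marble, re-filtering and re-sorting the live colors inside every loop iteration; B observes that the least-remaining rule consumes each color contiguously in ascending order of count, so it sorts the counts once and adds a closed-form per-color contribution (ceil/floor of count/2 plus the singleton bonus) in one pass.
import Mathlib
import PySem

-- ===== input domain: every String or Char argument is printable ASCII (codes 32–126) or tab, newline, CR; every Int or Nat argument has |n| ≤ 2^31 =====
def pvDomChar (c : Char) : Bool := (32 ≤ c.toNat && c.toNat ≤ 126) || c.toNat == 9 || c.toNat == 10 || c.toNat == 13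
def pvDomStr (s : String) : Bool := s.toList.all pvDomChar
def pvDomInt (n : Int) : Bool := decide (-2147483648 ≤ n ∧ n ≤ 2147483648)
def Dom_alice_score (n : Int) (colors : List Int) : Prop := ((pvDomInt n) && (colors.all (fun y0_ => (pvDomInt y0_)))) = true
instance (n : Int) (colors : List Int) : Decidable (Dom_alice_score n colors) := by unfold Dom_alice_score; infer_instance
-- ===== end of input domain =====

-- B sorts the color counts once and adds a closed-form per-color score instead of A's
-- per-marble re-filter/re-sort simulation (objective: faster, asymptotic).

-- ===== PORT A =====
def aCountStep (d : PySem.Dict Int Int) (c : Int) : PySem.Dict Int Int :=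
  if d.contains c then d.modify c 0 (· + 1) else d.insert c 1

-- A's while-loop; fuel = total marbles + 1 bounds the iterations (the loop removes one
-- marble per iteration), the real exit is the sum/empty tests, exactly as in the Python.
def aLoop (fuel : Nat) (cc taken rem : PySem.Dict Int Int) (turn score : Int) : Int :=
  match fuel with
  | 0 => score
  | Nat.succ fuel' =>
    if rem.values.sum > 0 then
      let remainingColors := (rem.items.filter (fun p => decide (0 < p.2))).map Prod.fst
      match PySem.List.sorted remainingColors (fun x => rem.getD x 0) false with
      | [] => score
      | sel :: _ =>
        if turn = 0 then
          let taken' := taken.modify sel 0 (· + 1)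
          let rem' := rem.modify sel 0 (· - 1)
          let score' := score +
            (if rem'.getD sel 0 = 0 ∧ taken'.getD sel 0 = cc.getD sel 0 then 1 else 0) + 1
          aLoop fuel' cc taken' rem' (1 - turn) score'
        else
          aLoop fuel' cc taken (rem.modify sel 0 (· - 1)) (1 - turn) score
    else score

def alice_score (n : Int) (colors : List Int) : Int :=
  let color_counts := colors.foldl aCountStep PySem.Dict.empty
  let alice_taken := color_counts.keys.foldl (fun d k => d.insert k 0) PySem.Dict.empty
  let _total_marbles := colors.length
  let _sorted_colors := PySem.List.sorted color_counts.items (fun p => p.2) false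
  aLoop (colors.length + 1) color_counts alice_taken color_counts 0 0

-- ===== PORT B =====
def alice_score_alt (n : Int) (colors : List Int) : Int :=
  let counts := colors.foldl (fun d c => d.insert c (d.getD c 0 + 1)) PySem.Dict.empty
  let vals := PySem.List.sorted counts.values (fun x => x) false
  (vals.foldl (fun (sp : Int × Int) cnt =>
      if sp.2 % 2 = 0 then
        (sp.1 + PySem.Int.floordiv (cnt + 1) 2 + (if cnt = 1 then 1 else 0), sp.2 + cnt)
      else
        (sp.1 + PySem.Int.floordiv cnt 2, sp.2 + cnt)) ((0 : Int), (0 : Int))).1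

-- ===== PRECONDITION & SPEC =====
def Spec_alice_score (n : Int) (colors : List Int) (out : Int) : Prop := out = alice_score_alt n colors
instance (n : Int) (colors : List Int) (out : Int) : Decidable (Spec_alice_score n colors out) := by unfold Spec_alice_score; infer_instance

-- ===== CLAIM (what is proved, stated in full; the proofs are below) =====
def Claim_equal_alice_score : Prop := ∀ (n : Int) (colors : List Int), Dom_alice_score n colors → Spec_alice_score n colors (alice_score n colors)

-- ===== LEMMAS AND PROOFS =====

-- Per-color score contribution, marble by marble: r marbles left of the selected color,
-- Alice has taken t of it so far, its original count is o, turn ∈ {0,1}.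
def g : Nat → Int → Int → Int → Int
  | 0, _, _, _ => 0
  | r+1, t, o, turn =>
    if turn = 0 then
      (if (r : Int) = 0 ∧ t + 1 = o then (1:Int) else 0) + 1 + g r (t+1) o (1 - turn)
    else g r t o (1 - turn)

def flipTurn (v : Nat) (turn : Int) : Int := if v % 2 = 0 then turn else 1 - turn

-- Color-by-color abstraction of A's loop: m = number of live colors, K = key list,
-- f/tf/cf = remaining count, Alice's takes, original count per key.
def spec : Nat → List Int → (Int → Int) → (Int → Int) → (Int → Int) → Int → Int
  | 0, _, _, _, _, _ => 0
  | m+1, K, f, tf, cf, turn =>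
    match PySem.List.sorted (K.filter (fun k => decide (0 < f k))) f false with
    | [] => 0
    | sel :: _ =>
      g (f sel).toNat (tf sel) (cf sel) turn
        + spec m K (fun k => if k = sel then 0 else f k) tf cf (flipTurn (f sel).toNat turn)

-- Value-list form of spec (only the multiset of counts matters).
def foldG : List Int → Int → Int
  | [], _ => 0
  | v :: rest, turn => g v.toNat 0 v turn + foldG rest (flipTurn v.toNat turn)

theorem flipTurn_succ (j : Nat) (turn : Int) :
    flipTurn (j + 1) turn = flipTurn j (1 - turn) := by
  simp only [flipTurn]
  split_ifs <;> omega

theorem flipTurn_mem (j : Nat) (turn : Int) (h : turn = 0 ∨ turn = 1) :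
    flipTurn j turn = 0 ∨ flipTurn j turn = 1 := by
  simp only [flipTurn]; rcases h with rfl | rfl <;> split <;> simp

theorem aCountStep_eq (d : PySem.Dict Int Int) (c : Int) :
    aCountStep d c = d.modify c 0 (· + 1) := by
  unfold aCountStep
  by_cases h : d.contains c
  · simp [h]
  · have h0 : d.getD c 0 = 0 := PySem.Dict.getD_of_not_contains d 0 (by simpa using h)
    have h1 : d.modify c 0 (· + 1) = d.insert c (d.getD c 0 + 1) := rfl
    rw [if_neg h, h1, h0]; norm_num

theorem aCount_eq_counter (colors : List Int) :
    colors.foldl aCountStep PySem.Dict.empty = PySem.Dict.counter colors := by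
  rw [PySem.Dict.counter_eq_foldl]
  suffices h : ∀ (l : List Int) (d : PySem.Dict Int Int),
      l.foldl aCountStep d = l.foldl (fun d x => d.modify x 0 (· + 1)) d from h colors _
  intro l
  induction l with
  | nil => intro d; rfl
  | cons c l ih => intro d; simp only [List.foldl_cons]; rw [aCountStep_eq]; exact ih _

theorem getD_foldl_insert_zero (K : List Int) (d : PySem.Dict Int Int) (k : Int)
    (h : d.getD k 0 = 0) : (K.foldl (fun d k => d.insert k (0 : Int)) d).getD k 0 = 0 := by
  induction K generalizing d with
  | nil => exact h
  | cons a K ih =>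
    simp only [List.foldl_cons]
    refine ih _ ?_
    rw [PySem.Dict.getD_insert]
    split <;> simp [h]

theorem keys_taken0 (K : List Int) (hnd : K.Nodup) :
    (K.foldl (fun d k => d.insert k (0 : Int)) (PySem.Dict.empty : PySem.Dict Int Int)).keys = K := by
  have h := PySem.Dict.keys_foldl_insert K (fun _ _ => (0 : Int)) PySem.Dict.empty
  rw [show (List.foldl (fun d k => d.insert k (0 : Int))
        (PySem.Dict.empty : PySem.Dict Int Int) K).keys
      = PySem.Set.update (PySem.Dict.empty : PySem.Dict Int Int).keys K from h]
  rw [PySem.Dict.keys_empty, PySem.Set.update_nil_left]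
  exact PySem.Set.ofList_eq_self_of_nodup K hnd

theorem filter_map_pair (l : List Int) (f : Int → Int) :
    ((l.map (fun k => (k, f k))).filter (fun p => decide (0 < p.2))).map Prod.fst
      = l.filter (fun k => decide (0 < f k)) := by
  induction l with
  | nil => rfl
  | cons a l ih => by_cases h : 0 < f a <;> simp [h, ih]

theorem live_eq (d : PySem.Dict Int Int) (hnd : d.keys.Nodup) :
    (d.items.filter (fun p => decide (0 < p.2))).map Prod.fst
      = d.keys.filter (fun k => decide (0 < d.getD k 0)) := by
  rw [PySem.Dict.items_eq_map_keys d hnd 0, filter_map_pair]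

theorem sorted_head_strict_min (L : List Int) (f : Int → Int) (sel : Int)
    (hmem : sel ∈ L) (hlt : ∀ y ∈ L, y ≠ sel → f sel < f y) :
    ∃ t, PySem.List.sorted L f false = sel :: t := by
  cases hs : PySem.List.sorted L f false with
  | nil =>
    rw [PySem.List.sorted_eq_nil_iff] at hs
    subst hs; cases hmem
  | cons m t =>
    have hm : m ∈ L := by
      have h1 : m ∈ PySem.List.sorted L f false := by rw [hs]; simp
      rwa [PySem.List.mem_sorted] at h1
    by_cases hme : m = sel
    · subst hme; exact ⟨t, rfl⟩
    · have h1 := PySem.List.key_head_sorted_le L f hs sel hmem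
      have h2 := hlt m hm hme
      omega

theorem filter_false_at_erase (K : List Int) (sel : Int) (p p' : Int → Bool)
    (hsel : p' sel = false) (hp : p sel = true)
    (hagree : ∀ k, k ≠ sel → p' k = p k) (hnd : K.Nodup) :
    K.filter p' = (K.filter p).erase sel := by
  induction K with
  | nil => rfl
  | cons a K ih =>
    obtain ⟨hna, hndK⟩ := List.nodup_cons.mp hnd
    by_cases ha : a = sel
    · subst ha
      have hfeq : K.filter p' = K.filter p :=
        List.filter_congr (fun x hx => by rw [hagree x (fun hxs => hna (hxs ▸ hx))])
      simp [List.filter_cons, hsel, hp, hfeq]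
    · rw [List.filter_cons, List.filter_cons, hagree a ha]
      by_cases hpa : p a = true
      · simp only [hpa, if_pos]
        rw [List.erase_cons_tail (by simpa using ha)]
        rw [ih hndK]
      · simp only [hpa]
        simp only [Bool.false_eq_true, if_neg, ite_false]
        exact ih hndK

theorem sum_map_update (K : List Int) (sel : Int) (f : Int → Int) (c : Int) :
    K.Nodup → sel ∈ K →
    (K.map (fun k => if k = sel then c else f k)).sum = (K.map f).sum - f sel + c := by
  induction K with
  | nil => intro _ h; cases h
  | cons a K ih =>
    intro hnd hmem
    obtain ⟨hna, hndK⟩ := List.nodup_cons.mp hnd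
    by_cases ha : a = sel
    · subst ha
      have hmap : K.map (fun k => if k = a then c else f k) = K.map f :=
        List.map_congr_left (fun x hx => by
          rw [if_neg (show x ≠ a from fun hxs => hna (hxs ▸ hx))])
      simp [hmap]
      ring
    · have hmem' : sel ∈ K := by
        rcases List.mem_cons.mp hmem with h | h
        · exact absurd h.symm ha
        · exact h
      simp only [List.map_cons, List.sum_cons, if_neg ha, ih hndK hmem']
      ring

theorem all_zero_of_sum_le (K : List Int) (f : Int → Int)
    (hnn : ∀ k ∈ K, 0 ≤ f k) (hs : (K.map f).sum ≤ 0) : ∀ k ∈ K, f k = 0 := by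
  intro k hk
  have h1 : f k ≤ (K.map f).sum :=
    List.single_le_sum (by intro x hx; obtain ⟨y, hy, rfl⟩ := List.mem_map.mp hx; exact hnn y hy)
      _ (List.mem_map_of_mem hk)
  have h2 := hnn k hk
  omega

-- ===== the inner lemma: consume one strictly-minimal color marble by marble =====
theorem aLoop_consume (j : Nat) :
    ∀ (fuel : Nat) (cc taken rem : PySem.Dict Int Int) (turn score : Int)
      (sel : Int) (K : List Int),
      rem.keys = K → K.Nodup → cc.keys = K → taken.keys = K →
      sel ∈ K →
      rem.getD sel 0 = (j : Int) →
      (∀ k ∈ K, 0 ≤ rem.getD k 0) →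
      (∀ k ∈ K, k ≠ sel → rem.getD k 0 = 0 ∨ (j : Int) < rem.getD k 0) →
      (turn = 0 ∨ turn = 1) →
      j ≤ fuel →
      ∃ (taken' rem' : PySem.Dict Int Int),
        aLoop fuel cc taken rem turn score
          = aLoop (fuel - j) cc taken' rem' (flipTurn j turn)
              (score + g j (taken.getD sel 0) (cc.getD sel 0) turn)
        ∧ rem'.keys = K ∧ taken'.keys = K
        ∧ rem'.getD sel 0 = 0
        ∧ (∀ k, k ≠ sel → rem'.getD k 0 = rem.getD k 0)
        ∧ (∀ k, k ≠ sel → taken'.getD k 0 = taken.getD k 0) := by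
  induction j with
  | zero =>
    intro fuel cc taken rem turn score sel K hkr hnd hkc hkt hselK hjr hnn hmin hturn hfuel
    exact ⟨taken, rem, by simp [g, flipTurn], hkr, hkt, hjr, fun _ _ => rfl, fun _ _ => rfl⟩
  | succ j ih =>
    intro fuel cc taken rem turn score sel K hkr hnd hkc hkt hselK hjr hnn hmin hturn hfuel
    cases fuel with
    | zero => omega
    | succ fuel' =>
      have hcont : rem.contains sel := by
        rw [PySem.Dict.contains_iff_mem_keys, hkr]; exact hselK
      have hndr : rem.keys.Nodup := by rw [hkr]; exact hnd
      have hvals : rem.values = K.map (fun k => rem.getD k 0) := by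
        rw [PySem.Dict.values_eq_map_keys rem hndr 0, hkr]
      have hsum : rem.values.sum > 0 := by
        rw [hvals]
        have h1 : rem.getD sel 0 ≤ (K.map (fun k => rem.getD k 0)).sum := by
          refine List.single_le_sum ?_ _ (List.mem_map_of_mem hselK)
          intro x hx; obtain ⟨y, hy, rfl⟩ := List.mem_map.mp hx; exact hnn y hy
        omega
      have hlive : (rem.items.filter (fun p => decide (0 < p.2))).map Prod.fst
          = K.filter (fun k => decide (0 < rem.getD k 0)) := by
        rw [live_eq rem hndr, hkr]
      have hselL : sel ∈ K.filter (fun k => decide (0 < rem.getD k 0)) := by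
        rw [List.mem_filter]; exact ⟨hselK, by rw [hjr]; simp⟩
      obtain ⟨stl, hs⟩ := sorted_head_strict_min _ (fun x => rem.getD x 0) sel hselL
        (by
          intro y hy hne
          obtain ⟨hyK, hypos⟩ := List.mem_filter.mp hy
          show rem.getD sel 0 < rem.getD y 0
          simp only [decide_eq_true_eq] at hypos
          rcases hmin y hyK hne with h | h
          · omega
          · omega)
      have hkr1 : (rem.modify sel 0 (· - 1)).keys = K := by
        rw [PySem.Dict.keys_modify, PySem.Dict.keys_insert_of_contains _ _ hcont, hkr]
      have hgr1 : ∀ k, (rem.modify sel 0 (· - 1)).getD k 0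
          = if k = sel then rem.getD sel 0 - 1 else rem.getD k 0 := by
        intro k; rw [PySem.Dict.getD_modify]
      rcases hturn with rfl | rfl
      · -- Alice's turn
        have hkt1 : (taken.modify sel 0 (· + 1)).keys = K := by
          rw [PySem.Dict.keys_modify,
            PySem.Dict.keys_insert_of_contains _ _ (show taken.contains sel = true from by
              rw [PySem.Dict.contains_iff_mem_keys, hkt]; exact hselK), hkt]
        have hgt1 : ∀ k, (taken.modify sel 0 (· + 1)).getD k 0
            = if k = sel then taken.getD sel 0 + 1 else taken.getD k 0 := by
          intro k; rw [PySem.Dict.getD_modify]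
        obtain ⟨taken', rem', heq, hk1, hk2, hz, hremf, htakf⟩ :=
          ih fuel' cc (taken.modify sel 0 (· + 1)) (rem.modify sel 0 (· - 1))
            (1 - 0) (score + (if ((j:Int) = 0 ∧ taken.getD sel 0 + 1 = cc.getD sel 0) then 1 else 0) + 1)
            sel K hkr1 hnd hkc hkt1 hselK
            (by rw [hgr1, if_pos rfl, hjr]; omega)
            (by
              intro k hk; rw [hgr1]
              split
              · rw [hjr]; omega
              · exact hnn k hk)
            (by
              intro k hk hne; rw [hgr1, if_neg hne]
              rcases hmin k hk hne with h | h
              · exact Or.inl h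
              · right; omega)
            (by omega) (by omega)
        refine ⟨taken', rem', ?_, hk1, hk2, hz, ?_, ?_⟩
        · have hstep : aLoop (fuel' + 1) cc taken rem 0 score
              = aLoop fuel' cc (taken.modify sel 0 (· + 1)) (rem.modify sel 0 (· - 1)) (1 - 0)
                  (score + (if ((rem.modify sel 0 (· - 1)).getD sel 0 = 0
                      ∧ (taken.modify sel 0 (· + 1)).getD sel 0 = cc.getD sel 0) then 1 else 0) + 1) := by
            simp [aLoop, hsum, hlive, hs]
          have hc1 : (rem.modify sel 0 (· - 1)).getD sel 0 = (j : Int) := by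
            rw [hgr1, if_pos rfl, hjr]; omega
          have hc2 : (taken.modify sel 0 (· + 1)).getD sel 0 = taken.getD sel 0 + 1 := by
            rw [hgt1, if_pos rfl]
          rw [hc2] at heq
          rw [hstep, hc1, hc2, heq]
          have hft : flipTurn (j + 1) 0 = flipTurn j (1 - 0) := flipTurn_succ j 0
          have hg : g (j + 1) (taken.getD sel 0) (cc.getD sel 0) 0
              = (if ((j:Int) = 0 ∧ taken.getD sel 0 + 1 = cc.getD sel 0) then (1:Int) else 0) + 1
                + g j (taken.getD sel 0 + 1) (cc.getD sel 0) (1 - 0) := by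
            simp only [g, eq_self_iff_true, if_true, if_pos rfl]
          have hfuel2 : fuel' + 1 - (j + 1) = fuel' - j := by omega
          rw [hfuel2, ← hft, hg]
          ring_nf
        · intro k hk; rw [hremf k hk, hgr1, if_neg hk]
        · intro k hk; rw [htakf k hk, hgt1, if_neg hk]
      · -- Bob's turn
        obtain ⟨taken', rem', heq, hk1, hk2, hz, hremf, htakf⟩ :=
          ih fuel' cc taken (rem.modify sel 0 (· - 1)) (1 - 1) score sel K hkr1 hnd hkc hkt hselK
            (by rw [hgr1, if_pos rfl, hjr]; omega)
            (by
              intro k hk; rw [hgr1]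
              split
              · rw [hjr]; omega
              · exact hnn k hk)
            (by
              intro k hk hne; rw [hgr1, if_neg hne]
              rcases hmin k hk hne with h | h
              · exact Or.inl h
              · right; omega)
            (by omega) (by omega)
        refine ⟨taken', rem', ?_, hk1, hk2, hz, ?_, ?_⟩
        · have hstep : aLoop (fuel' + 1) cc taken rem 1 score
              = aLoop fuel' cc taken (rem.modify sel 0 (· - 1)) (1 - 1) score := by
            simp [aLoop, hsum, hlive, hs]
          rw [hstep, heq]
          have hft : flipTurn (j + 1) 1 = flipTurn j (1 - 1) := flipTurn_succ j 1
          have hg : g (j + 1) (taken.getD sel 0) (cc.getD sel 0) 1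
              = g j (taken.getD sel 0) (cc.getD sel 0) (1 - 1) := by
            simp [g]
          have hfuel2 : fuel' + 1 - (j + 1) = fuel' - j := by omega
          rw [hfuel2, ← hft, hg]
        · intro k hk; rw [hremf k hk, hgr1, if_neg hk]
        · exact htakf

theorem spec_congr_tf : ∀ (m : Nat) (K : List Int) (f tf tf' cf : Int → Int) (turn : Int),
    (∀ k ∈ K, 0 < f k → tf k = tf' k) →
    spec m K f tf cf turn = spec m K f tf' cf turn := by
  intro m
  induction m with
  | zero => intros; rfl
  | succ m ih =>
    intro K f tf tf' cf turn h
    simp only [spec]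
    cases hs : PySem.List.sorted (K.filter (fun k => decide (0 < f k))) f false with
    | nil => rfl
    | cons sel stl =>
      have hsel : sel ∈ K.filter (fun k => decide (0 < f k)) := by
        have h1 : sel ∈ PySem.List.sorted (K.filter (fun k => decide (0 < f k))) f false := by
          rw [hs]; simp
        rwa [PySem.List.mem_sorted] at h1
      obtain ⟨hselK, hpos⟩ := List.mem_filter.mp hsel
      have hpos' : 0 < f sel := by simpa using hpos
      show g (f sel).toNat (tf sel) (cf sel) turn
            + spec m K (fun k => if k = sel then 0 else f k) tf cf (flipTurn (f sel).toNat turn)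
          = g (f sel).toNat (tf' sel) (cf sel) turn
            + spec m K (fun k => if k = sel then 0 else f k) tf' cf (flipTurn (f sel).toNat turn)
      rw [h sel hselK hpos']
      rw [ih K _ tf tf' cf _ ?_]
      intro k hk hp
      by_cases hks : k = sel
      · subst hks; simp at hp
      · simp only [if_neg hks] at hp
        exact h k hk hp

-- ===== the main simulation lemma: A's loop = the color-by-color abstraction =====
theorem aLoop_eq_spec : ∀ (fuel : Nat) (K : List Int) (cc taken rem : PySem.Dict Int Int)
    (turn score : Int),
    rem.keys = K → K.Nodup → cc.keys = K → taken.keys = K →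
    (∀ k ∈ K, 0 ≤ rem.getD k 0) →
    (turn = 0 ∨ turn = 1) →
    ((K.map (fun k => rem.getD k 0)).sum ≤ (fuel : Int)) →
    aLoop fuel cc taken rem turn score
      = score + spec ((K.filter (fun k => decide (0 < rem.getD k 0))).length) K
          (fun k => rem.getD k 0) (fun k => taken.getD k 0) (fun k => cc.getD k 0) turn := by
  intro fuel
  induction fuel using Nat.strong_induction_on with
  | _ fuel IH =>
    intro K cc taken rem turn score hkr hnd hkc hkt hnn hturn hfuel
    have hndr : rem.keys.Nodup := by rw [hkr]; exact hnd
    have hvals : rem.values = K.map (fun k => rem.getD k 0) := by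
      rw [PySem.Dict.values_eq_map_keys rem hndr 0, hkr]
    by_cases hsum : (K.map (fun k => rem.getD k 0)).sum ≤ 0
    · -- loop is over
      have hz := all_zero_of_sum_le K _ hnn hsum
      have hliveK : K.filter (fun k => decide (0 < rem.getD k 0)) = [] := by
        rw [List.filter_eq_nil_iff]
        intro k hk; rw [hz k hk]; simp
      rw [hliveK]
      cases fuel with
      | zero => simp [aLoop, spec]
      | succ fuel' =>
        have hns : ¬ rem.values.sum > 0 := by rw [hvals]; omega
        simp only [aLoop, if_neg hns, List.length_nil, spec]
        omega
    · push_neg at hsum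
      cases fuel with
      | zero => norm_num at hfuel; omega
      | succ fuel' =>
        have hsum' : rem.values.sum > 0 := by rw [hvals]; omega
        have hlive : (rem.items.filter (fun p => decide (0 < p.2))).map Prod.fst
            = K.filter (fun k => decide (0 < rem.getD k 0)) := by
          rw [live_eq rem hndr, hkr]
        have hlne : K.filter (fun k => decide (0 < rem.getD k 0)) ≠ [] := by
          intro hnil
          have hzz : ∀ k ∈ K, rem.getD k 0 = 0 := by
            intro k hk
            have h3 := List.filter_eq_nil_iff.mp hnil k hk
            have h2 := hnn k hk
            simp at h3; omega
          have h4 : (K.map (fun k => rem.getD k 0)).sum = 0 := by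
            rw [List.map_congr_left (fun k hk => hzz k hk)]
            simp
          omega
        cases hsrt : PySem.List.sorted (K.filter (fun k => decide (0 < rem.getD k 0)))
            (fun x => rem.getD x 0) false with
        | nil => exact absurd ((PySem.List.sorted_eq_nil_iff _ _ _).mp hsrt) hlne
        | cons sel stl =>
          have hselL : sel ∈ K.filter (fun k => decide (0 < rem.getD k 0)) := by
            have h1 : sel ∈ PySem.List.sorted (K.filter (fun k => decide (0 < rem.getD k 0)))
                (fun x => rem.getD x 0) false := by rw [hsrt]; simp
            rwa [PySem.List.mem_sorted] at h1
          obtain ⟨hselK, hselpos'⟩ := List.mem_filter.mp hselL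
          have hselpos : 0 < rem.getD sel 0 := by simpa using hselpos'
          have hmin : ∀ y ∈ K.filter (fun k => decide (0 < rem.getD k 0)),
              rem.getD sel 0 ≤ rem.getD y 0 := PySem.List.key_head_sorted_le _ _ hsrt
          have hrsum : rem.getD sel 0 ≤ (K.map (fun k => rem.getD k 0)).sum := by
            refine List.single_le_sum ?_ _ (List.mem_map_of_mem hselK)
            intro x hx; obtain ⟨y, hy, rfl⟩ := List.mem_map.mp hx; exact hnn y hy
          obtain ⟨j, hjr⟩ : ∃ j : Nat, rem.getD sel 0 - 1 = (j : Int) :=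
            ⟨(rem.getD sel 0 - 1).toNat, by omega⟩
          have hrtoNat : (rem.getD sel 0).toNat = j + 1 := by omega
          have hcont : rem.contains sel := by
            rw [PySem.Dict.contains_iff_mem_keys, hkr]; exact hselK
          have hkr1 : (rem.modify sel 0 (· - 1)).keys = K := by
            rw [PySem.Dict.keys_modify, PySem.Dict.keys_insert_of_contains _ _ hcont, hkr]
          have hgr1 : ∀ k, (rem.modify sel 0 (· - 1)).getD k 0
              = if k = sel then rem.getD sel 0 - 1 else rem.getD k 0 := by
            intro k; rw [PySem.Dict.getD_modify]
          have hminstrict : ∀ k ∈ K, k ≠ sel →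
              (rem.modify sel 0 (· - 1)).getD k 0 = 0
                ∨ (j:Int) < (rem.modify sel 0 (· - 1)).getD k 0 := by
            intro k hk hne
            rw [hgr1, if_neg hne]
            rcases (hnn k hk).lt_or_eq with h | h
            · right
              have h2 := hmin k (List.mem_filter.mpr ⟨hk, by simpa using h⟩)
              omega
            · left; omega
          have hlen : (K.filter (fun k => decide (0 < rem.getD k 0))).length
              = ((K.filter (fun k => decide (0 < rem.getD k 0))).erase sel).length + 1 := by
            rw [List.length_erase_of_mem hselL]
            have := List.length_pos_of_mem hselL
            omega
          have hliveerase : K.filter (fun k => decide (0 < (if k = sel then 0 else rem.getD k 0)))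
              = (K.filter (fun k => decide (0 < rem.getD k 0))).erase sel := by
            refine filter_false_at_erase K sel _ _ ?_ ?_ ?_ hnd
            · simp
            · simp; omega
            · intro k hk; rw [if_neg hk]
          rcases hturn with rfl | rfl
          · -- Alice begins this color
            have hkt1 : (taken.modify sel 0 (· + 1)).keys = K := by
              rw [PySem.Dict.keys_modify,
                PySem.Dict.keys_insert_of_contains _ _ (show taken.contains sel = true from by
                  rw [PySem.Dict.contains_iff_mem_keys, hkt]; exact hselK), hkt]
            have hgt1 : ∀ k, (taken.modify sel 0 (· + 1)).getD k 0
                = if k = sel then taken.getD sel 0 + 1 else taken.getD k 0 := by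
              intro k; rw [PySem.Dict.getD_modify]
            obtain ⟨taken', rem', heq, hk1, hk2, hz, hremf, htakf⟩ :=
              aLoop_consume j fuel' cc (taken.modify sel 0 (· + 1)) (rem.modify sel 0 (· - 1))
                (1 - 0)
                (score + (if ((j:Int) = 0 ∧ taken.getD sel 0 + 1 = cc.getD sel 0) then 1 else 0) + 1)
                sel K hkr1 hnd hkc hkt1 hselK
                (by rw [hgr1, if_pos rfl, hjr])
                (by
                  intro k hk; rw [hgr1]
                  split
                  · omega
                  · exact hnn k hk)
                hminstrict (by omega) (by omega)
            have hstep : aLoop (fuel' + 1) cc taken rem 0 score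
                = aLoop fuel' cc (taken.modify sel 0 (· + 1)) (rem.modify sel 0 (· - 1)) (1 - 0)
                    (score + (if ((rem.modify sel 0 (· - 1)).getD sel 0 = 0
                        ∧ (taken.modify sel 0 (· + 1)).getD sel 0 = cc.getD sel 0) then 1 else 0) + 1) := by
              simp [aLoop, hsum', hlive, hsrt]
            have hc1 : (rem.modify sel 0 (· - 1)).getD sel 0 = (j : Int) := by
              rw [hgr1, if_pos rfl, hjr]
            have hc2 : (taken.modify sel 0 (· + 1)).getD sel 0 = taken.getD sel 0 + 1 := by
              rw [hgt1, if_pos rfl]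
            rw [hc2] at heq
            rw [hstep, hc1, hc2, heq]
            have hremfun' : ∀ k, rem'.getD k 0 = if k = sel then 0 else rem.getD k 0 := by
              intro k
              by_cases hk : k = sel
              · subst hk; rw [hz, if_pos rfl]
              · rw [hremf k hk, hgr1, if_neg hk, if_neg hk]
            have hIH := IH (fuel' - j) (by omega) K cc taken' rem'
              (flipTurn j (1 - 0))
              (score + (if ((j:Int) = 0 ∧ taken.getD sel 0 + 1 = cc.getD sel 0) then 1 else 0) + 1
                + g j (taken.getD sel 0 + 1) (cc.getD sel 0) (1 - 0))
              hk1 hnd hkc hk2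
              (by
                intro k hk; rw [hremfun' k]
                split
                · omega
                · exact hnn k hk)
              (flipTurn_mem j (1 - 0) (by norm_num))
              (by
                have hsum2 : (K.map (fun k => rem'.getD k 0)).sum
                    = (K.map (fun k => rem.getD k 0)).sum - rem.getD sel 0 := by
                  rw [show (fun k => rem'.getD k 0) = (fun k => if k = sel then 0 else rem.getD k 0)
                      from funext hremfun']
                  rw [sum_map_update K sel _ 0 hnd hselK]; omega
                rw [hsum2]
                push_cast
                omega)
            rw [hIH]
            rw [hlen]
            have hunfold : spec
                  (((K.filter (fun k => decide (0 < rem.getD k 0))).erase sel).length + 1) K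
                  (fun k => rem.getD k 0) (fun k => taken.getD k 0) (fun k => cc.getD k 0) 0
                = g (rem.getD sel 0).toNat (taken.getD sel 0) (cc.getD sel 0) 0
                  + spec ((K.filter (fun k => decide (0 < rem.getD k 0))).erase sel).length K
                      (fun k => if k = sel then 0 else rem.getD k 0) (fun k => taken.getD k 0)
                      (fun k => cc.getD k 0) (flipTurn (rem.getD sel 0).toNat 0) := by
              simp only [spec, hsrt]
            rw [hunfold]
            have hgfull : g (rem.getD sel 0).toNat (taken.getD sel 0) (cc.getD sel 0) 0
                = (if ((j:Int) = 0 ∧ taken.getD sel 0 + 1 = cc.getD sel 0) then (1:Int) else 0) + 1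
                  + g j (taken.getD sel 0 + 1) (cc.getD sel 0) (1 - 0) := by
              rw [hrtoNat]; simp only [g, eq_self_iff_true, if_true, if_pos rfl]
            have hflip : flipTurn (rem.getD sel 0).toNat 0 = flipTurn j (1 - 0) := by
              rw [hrtoNat, flipTurn_succ]
            simp only [hremfun']
            have hspec2 : spec ((K.filter (fun k => decide (0 < rem.getD k 0))).erase sel).length K
                  (fun k => if k = sel then 0 else rem.getD k 0)
                  (fun k => taken'.getD k 0) (fun k => cc.getD k 0) (flipTurn j (1 - 0))
                = spec ((K.filter (fun k => decide (0 < rem.getD k 0))).erase sel).length K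
                  (fun k => if k = sel then 0 else rem.getD k 0)
                  (fun k => taken.getD k 0) (fun k => cc.getD k 0) (flipTurn j (1 - 0)) := by
              refine spec_congr_tf _ K _ _ _ _ _ ?_
              intro k hk hpos
              have hkne : k ≠ sel := by
                intro hks; subst hks; simp at hpos
              rw [htakf k hkne, hgt1, if_neg hkne]
            rw [hliveerase, hspec2, hgfull, hflip]
            ring
          · -- Bob begins this color
            obtain ⟨taken', rem', heq, hk1, hk2, hz, hremf, htakf⟩ :=
              aLoop_consume j fuel' cc taken (rem.modify sel 0 (· - 1)) (1 - 1) score sel K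
                hkr1 hnd hkc hkt hselK
                (by rw [hgr1, if_pos rfl, hjr])
                (by
                  intro k hk; rw [hgr1]
                  split
                  · omega
                  · exact hnn k hk)
                hminstrict (by omega) (by omega)
            have hstep : aLoop (fuel' + 1) cc taken rem 1 score
                = aLoop fuel' cc taken (rem.modify sel 0 (· - 1)) (1 - 1) score := by
              simp [aLoop, hsum', hlive, hsrt]
            rw [hstep, heq]
            have hremfun' : ∀ k, rem'.getD k 0 = if k = sel then 0 else rem.getD k 0 := by
              intro k
              by_cases hk : k = sel
              · subst hk; rw [hz, if_pos rfl]
              · rw [hremf k hk, hgr1, if_neg hk, if_neg hk]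
            have hIH := IH (fuel' - j) (by omega) K cc taken' rem'
              (flipTurn j (1 - 1))
              (score + g j (taken.getD sel 0) (cc.getD sel 0) (1 - 1))
              hk1 hnd hkc hk2
              (by
                intro k hk; rw [hremfun' k]
                split
                · omega
                · exact hnn k hk)
              (flipTurn_mem j (1 - 1) (by norm_num))
              (by
                have hsum2 : (K.map (fun k => rem'.getD k 0)).sum
                    = (K.map (fun k => rem.getD k 0)).sum - rem.getD sel 0 := by
                  rw [show (fun k => rem'.getD k 0) = (fun k => if k = sel then 0 else rem.getD k 0)
                      from funext hremfun']
                  rw [sum_map_update K sel _ 0 hnd hselK]; omega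
                rw [hsum2]
                push_cast
                omega)
            rw [hIH]
            rw [hlen]
            have hunfold : spec
                  (((K.filter (fun k => decide (0 < rem.getD k 0))).erase sel).length + 1) K
                  (fun k => rem.getD k 0) (fun k => taken.getD k 0) (fun k => cc.getD k 0) 1
                = g (rem.getD sel 0).toNat (taken.getD sel 0) (cc.getD sel 0) 1
                  + spec ((K.filter (fun k => decide (0 < rem.getD k 0))).erase sel).length K
                      (fun k => if k = sel then 0 else rem.getD k 0) (fun k => taken.getD k 0)
                      (fun k => cc.getD k 0) (flipTurn (rem.getD sel 0).toNat 1) := by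
              simp only [spec, hsrt]
            rw [hunfold]
            have hgfull : g (rem.getD sel 0).toNat (taken.getD sel 0) (cc.getD sel 0) 1
                = g j (taken.getD sel 0) (cc.getD sel 0) (1 - 1) := by
              rw [hrtoNat]; simp [g]
            have hflip : flipTurn (rem.getD sel 0).toNat 1 = flipTurn j (1 - 1) := by
              rw [hrtoNat, flipTurn_succ]
            simp only [hremfun']
            have hspec2 : spec ((K.filter (fun k => decide (0 < rem.getD k 0))).erase sel).length K
                  (fun k => if k = sel then 0 else rem.getD k 0)
                  (fun k => taken'.getD k 0) (fun k => cc.getD k 0) (flipTurn j (1 - 1))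
                = spec ((K.filter (fun k => decide (0 < rem.getD k 0))).erase sel).length K
                  (fun k => if k = sel then 0 else rem.getD k 0)
                  (fun k => taken.getD k 0) (fun k => cc.getD k 0) (flipTurn j (1 - 1)) := by
              refine spec_congr_tf _ K _ _ _ _ _ ?_
              intro k hk hpos
              have hkne : k ≠ sel := by
                intro hks; subst hks; simp at hpos
              rw [htakf k hkne]
            rw [hliveerase, hspec2, hgfull, hflip]
            ring

-- ===== bridging spec to the sorted value list =====
theorem spec_eq_foldG : ∀ (m : Nat) (K : List Int) (f tf cf : Int → Int) (turn : Int),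
    K.Nodup →
    (∀ k ∈ K, 0 < f k → tf k = 0 ∧ cf k = f k) →
    m = (K.filter (fun k => decide (0 < f k))).length →
    spec m K f tf cf turn
      = foldG (PySem.List.sorted ((K.filter (fun k => decide (0 < f k))).map f)
          (fun x => x) false) turn := by
  intro m
  induction m with
  | zero =>
    intro K f tf cf turn hnd hfresh hm
    have hnil : K.filter (fun k => decide (0 < f k)) = [] :=
      List.length_eq_zero_iff.mp hm.symm
    simp only [spec]
    rw [hnil, List.map_nil, (PySem.List.sorted_eq_nil_iff _ _ _).mpr rfl]
    rfl
  | succ m ih =>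
    intro K f tf cf turn hnd hfresh hm
    set L := K.filter (fun k => decide (0 < f k)) with hL
    have hLnd : L.Nodup := hnd.filter _
    have hLne : L ≠ [] := by
      intro h; rw [h] at hm; simp at hm
    cases hsrt : PySem.List.sorted L f false with
    | nil => exact absurd ((PySem.List.sorted_eq_nil_iff _ _ _).mp hsrt) hLne
    | cons sel stl =>
      have hselL : sel ∈ L := by
        have h1 : sel ∈ PySem.List.sorted L f false := by rw [hsrt]; simp
        rwa [PySem.List.mem_sorted] at h1
      obtain ⟨hselK, hselpos'⟩ := List.mem_filter.mp hselL
      have hselpos : 0 < f sel := by simpa using hselpos'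
      obtain ⟨htf0, hcf⟩ := hfresh sel hselK hselpos
      cases hv : PySem.List.sorted (L.map f) (fun x => x) false with
      | nil =>
        exact absurd (List.map_eq_nil_iff.mp ((PySem.List.sorted_eq_nil_iff _ _ _).mp hv)) hLne
      | cons v rest =>
        -- the head value of the sorted value list is f sel
        have hvmem : v ∈ L.map f := by
          have h1 : v ∈ PySem.List.sorted (L.map f) (fun x => x) false := by
            rw [hv]; simp
          rwa [PySem.List.mem_sorted] at h1
        obtain ⟨y0, hy0L, hy0⟩ := List.mem_map.mp hvmem
        have hle1 : v ≤ f sel :=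
          PySem.List.key_head_sorted_le _ _ hv (f sel) (List.mem_map_of_mem hselL)
        have hle2 : f sel ≤ v := hy0 ▸ PySem.List.key_head_sorted_le _ _ hsrt y0 hy0L
        have hvsel : v = f sel := le_antisymm hle1 hle2
        -- the tail of the sorted value list is the sorted values of the remaining colors
        have hperm1 : (PySem.List.sorted (L.map f) (fun x => x) false).Perm (L.map f) :=
          PySem.List.sorted_perm _ _ _
        have hperm2 : (L.map f).Perm (f sel :: (L.erase sel).map f) :=
          (List.perm_cons_erase hselL).map f
        have hperm3 : (v :: rest).Perm (v :: (L.erase sel).map f) := by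
          rw [← hv, hvsel]
          exact hperm1.trans hperm2
        have hpermrest : rest.Perm ((L.erase sel).map f) := hperm3.cons_inv
        have hpairwise : rest.Pairwise (· ≤ ·) := by
          have h1 := PySem.List.sorted_pairwise (L.map f) (fun x => x)
          rw [hv] at h1
          exact (List.pairwise_cons.mp h1).2
        have hrest : PySem.List.sorted ((L.erase sel).map f) (fun x => x) false = rest :=
          PySem.List.sorted_id_eq_of_perm_of_pairwise _ _ hpermrest hpairwise
        -- the recursive live list
        have hlive' : K.filter (fun k => decide (0 < (if k = sel then 0 else f k)))
            = L.erase sel := by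
          refine filter_false_at_erase K sel _ _ ?_ ?_ ?_ hnd
          · simp
          · simp; omega
          · intro k hk; rw [if_neg hk]
        have hmapcongr : (L.erase sel).map (fun k => if k = sel then 0 else f k)
            = (L.erase sel).map f := by
          refine List.map_congr_left ?_
          intro k hk
          have hkne : k ≠ sel := ((hLnd.mem_erase_iff).mp hk).1
          rw [if_neg hkne]
        have hIH := ih K (fun k => if k = sel then 0 else f k) tf cf
          (flipTurn (f sel).toNat turn) hnd
          (by
            intro k hk hpos
            by_cases hkne : k = sel
            · subst hkne; simp at hpos
            · simp only [if_neg hkne] at hpos ⊢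
              exact hfresh k hk hpos)
          (by
            show m = (K.filter (fun k => decide (0 < (if k = sel then 0 else f k)))).length
            rw [hlive']
            have h5 := List.length_erase_of_mem hselL
            have h6 := List.length_pos_of_mem hselL
            omega)
        simp only [spec, ← hL, hsrt]
        show g (f sel).toNat (tf sel) (cf sel) turn
              + spec m K (fun k => if k = sel then 0 else f k) tf cf
                  (flipTurn (f sel).toNat turn)
            = foldG (v :: rest) turn
        rw [hIH]
        rw [show K.filter (fun k => decide (0 < (if k = sel then 0 else f k))) = L.erase sel
          from hlive']
        rw [hmapcongr, hrest]
        simp only [foldG]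
        rw [htf0, hcf, hvsel]

-- closed form for a whole fresh color (t = 0, o = r): what B adds per color
theorem g_closed : ∀ (r : Nat) (t o turn : Int), (turn = 0 ∨ turn = 1) →
    g r t o turn
      = (if turn = 0 then (((r+1)/2 : Nat) : Int) else ((r/2 : Nat) : Int))
        + (if 1 ≤ r ∧ (turn + r - 1) % 2 = 0 ∧
              t + (if turn = 0 then (((r+1)/2 : Nat) : Int) else ((r/2 : Nat) : Int)) = o
           then 1 else 0) := by
  intro r
  induction r with
  | zero =>
    intro t o turn hturn
    rcases hturn with rfl | rfl <;> simp [g]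
  | succ r ih =>
    intro t o turn hturn
    rcases hturn with rfl | rfl
    · simp only [g, if_pos rfl]
      rw [ih (t+1) o (1-0) (by norm_num)]
      norm_num
      split_ifs <;> push_cast at * <;> omega
    · have h1 : (1:Int) ≠ 0 := by norm_num
      simp only [g, if_neg h1]
      rw [ih t o (1-1) (by norm_num)]
      norm_num
      split_ifs <;> push_cast at * <;> omega

theorem g_closed_zero (v : Int) (h : 1 ≤ v) :
    g v.toNat 0 v 0 = PySem.Int.floordiv (v+1) 2 + (if v = 1 then 1 else 0) := by
  rw [g_closed v.toNat 0 v 0 (Or.inl rfl),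
    PySem.Int.floordiv_eq_ediv_of_pos (by norm_num)]
  have hv : ((v.toNat : Nat) : Int) = v := Int.toNat_of_nonneg (by omega)
  simp only [if_pos rfl]
  split_ifs <;> push_cast at * <;> omega

theorem g_closed_one (v : Int) (h : 1 ≤ v) :
    g v.toNat 0 v 1 = PySem.Int.floordiv v 2 := by
  rw [g_closed v.toNat 0 v 1 (Or.inr rfl),
    PySem.Int.floordiv_eq_ediv_of_pos (by norm_num)]
  have hv : ((v.toNat : Nat) : Int) = v := Int.toNat_of_nonneg (by omega)
  have h1 : (1:Int) ≠ 0 := by norm_num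
  simp only [if_neg h1]
  split_ifs <;> push_cast at * <;> omega

-- B's accumulator loop computes foldG
theorem foldB_eq (vals : List Int) : ∀ (score p : Int),
    (∀ v ∈ vals, 1 ≤ v) → 0 ≤ p →
    (vals.foldl (fun (sp : Int × Int) cnt =>
        if sp.2 % 2 = 0 then
          (sp.1 + PySem.Int.floordiv (cnt + 1) 2 + (if cnt = 1 then 1 else 0), sp.2 + cnt)
        else
          (sp.1 + PySem.Int.floordiv cnt 2, sp.2 + cnt)) (score, p)).1
      = score + foldG vals (p % 2) := by
  induction vals with
  | nil => intro score p _ _; simp [foldG]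
  | cons v rest ih =>
    intro score p hge hp
    have hv : 1 ≤ v := hge v List.mem_cons_self
    have hrest : ∀ w ∈ rest, 1 ≤ w := fun w hw => hge w (List.mem_cons_of_mem _ hw)
    have hvnat : ((v.toNat : Nat) : Int) = v := Int.toNat_of_nonneg (by omega)
    by_cases hpar : p % 2 = 0
    · rw [List.foldl_cons,
        show (if p % 2 = 0 then
            (score + PySem.Int.floordiv (v + 1) 2 + (if v = 1 then 1 else 0), p + v)
          else (score + PySem.Int.floordiv v 2, p + v))
          = (score + PySem.Int.floordiv (v + 1) 2 + (if v = 1 then 1 else 0), p + v)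
          from if_pos hpar]
      rw [ih _ _ hrest (by omega)]
      simp only [foldG, hpar]
      rw [g_closed_zero v hv]
      have hflip : flipTurn v.toNat 0 = (p + v) % 2 := by
        simp only [flipTurn]
        split_ifs with h
        · omega
        · have : v.toNat % 2 = 1 := by omega
          omega
      rw [hflip]
      ring
    · have hpar1 : p % 2 = 1 := by omega
      rw [List.foldl_cons,
        show (if p % 2 = 0 then
            (score + PySem.Int.floordiv (v + 1) 2 + (if v = 1 then 1 else 0), p + v)
          else (score + PySem.Int.floordiv v 2, p + v))
          = (score + PySem.Int.floordiv v 2, p + v)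
          from if_neg hpar]
      rw [ih _ _ hrest (by omega)]
      simp only [foldG, hpar1]
      rw [g_closed_one v hv]
      have hflip : flipTurn v.toNat 1 = (p + v) % 2 := by
        simp only [flipTurn]
        split_ifs with h
        · omega
        · have : v.toNat % 2 = 1 := by omega
          omega
      rw [hflip]
      ring

theorem sum_natCast_map (l : List Int) (f : Int → Nat) :
    (l.map (fun k => ((f k : Nat) : Int))).sum = (((l.map f).sum : Nat) : Int) := by
  induction l with
  | nil => rfl
  | cons a l ih => simp [ih]

theorem sum_counts (colors : List Int) :
    ((PySem.Set.ofList colors).map (fun k => ((List.count k colors : Nat) : Int))).sum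
      = (colors.length : Int) := by
  rw [sum_natCast_map]
  congr 1
  have hperm : (PySem.Set.ofList colors).Perm colors.dedup := by
    refine (List.perm_ext_iff_of_nodup (PySem.Set.nodup_ofList _) colors.nodup_dedup).mpr ?_
    intro a
    rw [PySem.Set.mem_ofList, List.mem_dedup]
  calc ((PySem.Set.ofList colors).map (fun k => List.count k colors)).sum
      = (colors.dedup.map (fun k => List.count k colors)).sum := (hperm.map _).sum_eq
    _ = colors.length := List.sum_map_count_dedup_eq_length colors

-- ===== VERDICT (by name: the statement is the Claim_ definition above) =====
theorem alice_score_spec : Claim_equal_alice_score := by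
  unfold Claim_equal_alice_score
  intro n colors _
  unfold Spec_alice_score alice_score alice_score_alt
  simp only []
  rw [aCount_eq_counter, PySem.Dict.foldl_insert_getD_add_one_eq_counter]
  set cc := PySem.Dict.counter colors with hcc
  set K := cc.keys with hK
  have hnd : K.Nodup := by rw [hK, hcc]; exact PySem.Dict.nodup_keys_counter colors
  have hKof : K = PySem.Set.ofList colors := by
    rw [hK, hcc]; exact PySem.Dict.keys_counter colors
  have hgetD : ∀ k, cc.getD k 0 = ((List.count k colors : Nat) : Int) := by
    intro k; rw [hcc]; exact PySem.Dict.getD_counter colors k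
  have hmemK : ∀ k ∈ K, k ∈ colors := by
    intro k hk; rw [hKof, PySem.Set.mem_ofList] at hk; exact hk
  have hpos : ∀ k ∈ K, 0 < cc.getD k 0 := by
    intro k hk
    rw [hgetD k]
    have h2 := List.count_pos_iff.mpr (hmemK k hk)
    omega
  have htak0 : ∀ k, (K.foldl (fun d k => d.insert k (0 : Int))
      (PySem.Dict.empty : PySem.Dict Int Int)).getD k 0 = 0 := by
    intro k
    exact getD_foldl_insert_zero K PySem.Dict.empty k (by simp)
  have hmain := aLoop_eq_spec (colors.length + 1) K cc
    (K.foldl (fun d k => d.insert k (0 : Int)) (PySem.Dict.empty : PySem.Dict Int Int)) cc 0 0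
    rfl hnd rfl (keys_taken0 K hnd)
    (fun k hk => le_of_lt (hpos k hk))
    (Or.inl rfl)
    (by
      have : (K.map (fun k => cc.getD k 0)).sum = (colors.length : Int) := by
        have hmapeq : K.map (fun k => cc.getD k 0)
            = (PySem.Set.ofList colors).map (fun k => ((List.count k colors : Nat) : Int)) := by
          rw [hKof]
          exact List.map_congr_left (fun k _ => hgetD k)
        rw [hmapeq, sum_counts]
      rw [this]
      push_cast
      omega)
  rw [hmain]
  have hfilter : K.filter (fun k => decide (0 < cc.getD k 0)) = K :=
    List.filter_eq_self.mpr (fun k hk => by simpa using hpos k hk)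
  have hbridge := spec_eq_foldG (K.filter (fun k => decide (0 < cc.getD k 0))).length K
    (fun k => cc.getD k 0)
    (fun k => (K.foldl (fun d k => d.insert k (0 : Int))
      (PySem.Dict.empty : PySem.Dict Int Int)).getD k 0)
    (fun k => cc.getD k 0) 0 hnd
    (fun k _ _ => ⟨htak0 k, rfl⟩) rfl
  rw [hbridge]
  have hvalues : cc.values = K.map (fun k => cc.getD k 0) := by
    rw [PySem.Dict.values_eq_map_keys cc (by rw [← hK]; exact hnd) 0, ← hK]
  have hvals1 : (K.filter (fun k => decide (0 < cc.getD k 0))).map (fun k => cc.getD k 0)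
      = cc.values := by rw [hfilter, hvalues]
  rw [hvals1]
  have hvge : ∀ v ∈ PySem.List.sorted cc.values (fun x => x) false, 1 ≤ v := by
    intro v hv
    rw [PySem.List.mem_sorted] at hv
    rw [hvalues] at hv
    obtain ⟨k, hk, rfl⟩ := List.mem_map.mp hv
    exact hpos k hk
  rw [foldB_eq _ 0 0 hvge le_rfl]
  norm_num
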